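-- pv_equiv track=rewrite | github.com/AdamZhouSE/pythonHomework | Code/CodeRecords/2135/60866/302271.py | shuzi
-- ===== SOURCE A (Python) =====
-- def shuzi(a):
--     a.sort()
--     l=0
--     r=len(a)-1
--     sum=0
--     while l<r:
--         sum=sum+a[r]-a[l]
--         l=l+1
--         r=r-1
--     return sum
-- ===== SOURCE B (Python) =====
-- def shuzi(a):
--     # Different algorithm: no sort at all. Repeatedly strip the global min and
--     # global max from a working copy, accumulating their difference; each pass
--     # pairs the current extremes, which is exactly the sorted ends pairing.
--     # Unlike A, this does not mutate the argument (return values are equal).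
--     b = list(a)
--     total = 0
--     while len(b) > 1:
--         m = min(b)
--         M = max(b)
--         total += M - m
--         b.remove(m)
--         b.remove(M)
--     return total
-- ===== Notes on version B (the rewrite author's own statement) =====
-- stated objective: alternative
-- what changed: Replaces sort-then-two-pointer pairing by a sort-free extremum-stripping loop: repeatedly take min and max of the remaining multiset, add their difference, and remove both; B does not mutate the argument (A sorts it in place), the proved equivalence is about the return value.
import Mathlib
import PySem

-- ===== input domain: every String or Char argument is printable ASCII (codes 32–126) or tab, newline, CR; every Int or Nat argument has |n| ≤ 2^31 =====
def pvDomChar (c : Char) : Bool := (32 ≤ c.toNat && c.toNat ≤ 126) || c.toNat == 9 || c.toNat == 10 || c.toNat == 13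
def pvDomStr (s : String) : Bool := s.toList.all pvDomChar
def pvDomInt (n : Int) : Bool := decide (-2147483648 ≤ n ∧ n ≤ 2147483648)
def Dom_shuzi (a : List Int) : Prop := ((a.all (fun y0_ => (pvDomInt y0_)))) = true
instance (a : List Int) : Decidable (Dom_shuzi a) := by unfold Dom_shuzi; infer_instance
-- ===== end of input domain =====

-- B replaces A's sort-then-two-pointer pairing by a sort-free loop that repeatedly strips the
-- global min and max of a working copy and accumulates their difference. A sorts its argument
-- in place and B does not; the equivalence proved here is about the return value only.

-- ===== PORT A =====
-- the while l < r loop of A; indices are in range whenever 0 ≤ l < r < len s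
def shuziLoop (s : List Int) (l r acc : Int) : Int :=
  if l < r then
    shuziLoop s (l + 1) (r - 1) (acc + PySem.List.pyGetD s r 0 - PySem.List.pyGetD s l 0)
  else acc
termination_by (r - l).toNat
decreasing_by omega

def shuzi (a : List Int) : Int :=
  let s := PySem.List.sorted a (fun x => x) false
  shuziLoop s 0 ((s.length : Int) - 1) 0

-- ===== PORT B =====
-- list.remove removes the first occurrence and shortens the list by one (needed for termination)
lemma remove?_length {xs r : List Int} {v : Int}
    (h : PySem.List.remove? xs v = some r) : r.length + 1 = xs.length := by
  have hv : v ∈ xs := by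
    by_contra hvn
    rw [(PySem.List.remove?_eq_none_iff xs v).mpr hvn] at h
    simp at h
  rw [PySem.List.remove?_eq_some_erase xs v hv] at h
  cases h
  simpa [List.length_erase, hv] using Nat.succ_pred_eq_of_pos (List.length_pos_of_mem hv)

-- the while len(b) > 1 loop of Source B: strip min and max, accumulate their difference
def stripLoop (b : List Int) (total : Int) : Int :=
  if 1 < b.length then
    match PySem.List.min? b (fun x => x) with
    | none => total            -- unreachable: b is nonempty
    | some m =>
      match PySem.List.max? b (fun x => x) with
      | none => total          -- unreachable
      | some M =>
        match h1 : PySem.List.remove? b m with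
        | none => total        -- unreachable: min is a member (Python would raise ValueError)
        | some b1 =>
          match h2 : PySem.List.remove? b1 M with
          | none => total      -- unreachable: max is still a member
          | some b2 => stripLoop b2 (total + (M - m))
  else total
termination_by b.length
decreasing_by
  have e1 := remove?_length h1
  have e2 := remove?_length h2
  omega

def shuzi_alt (a : List Int) : Int :=
  stripLoop a 0

-- ===== PRECONDITION & SPEC =====
def Spec_shuzi (a : List Int) (out : Int) : Prop := out = shuzi_alt a
instance (a : List Int) (out : Int) : Decidable (Spec_shuzi a out) := by unfold Spec_shuzi; infer_instance

-- ===== CLAIM (what is proved, stated in full; the proofs are below) =====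
def Claim_equal_shuzi : Prop := ∀ (a : List Int), Dom_shuzi a → Spec_shuzi a (shuzi a)

-- ===== LEMMAS AND PROOFS =====

-- the common value both loops compute: first-last pairing differences of a (sorted) list
def pairG (s : List Int) : Int :=
  if 1 < s.length then (s.getLastD 0 - s.headD 0) + pairG s.tail.dropLast else 0
termination_by s.length
decreasing_by simp [List.length_dropLast, List.length_tail]; omega

lemma pairG_short {s : List Int} (h : ¬ 1 < s.length) : pairG s = 0 := by
  rw [pairG, if_neg h]

lemma pairG_cons {m0 M : Int} {tl : List Int} (hzM : tl.getLast? = some M) :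
    pairG (m0 :: tl) = (M - m0) + pairG tl.dropLast := by
  have htlne : tl ≠ [] := by intro h; rw [h] at hzM; simp at hzM
  rw [pairG, if_pos (by cases tl with | nil => exact absurd rfl htlne | cons a l => simp)]
  have hlast : (m0 :: tl).getLastD 0 = M := by
    rw [List.getLastD_eq_getLast?]
    cases tl with
    | nil => exact absurd rfl htlne
    | cons a l => rw [List.getLast?_cons_cons, hzM]; rfl
  rw [hlast]
  rfl

-- in a ≤-sorted list every element is at most the last one
lemma pairwise_le_last : ∀ {s : List Int}, s.Pairwise (· ≤ ·) →
    ∀ {z : Int}, s.getLast? = some z → ∀ y ∈ s, y ≤ z := by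
  intro s
  induction s with
  | nil => intro _ z hz; simp at hz
  | cons a t ih =>
    intro hp z hz y hy
    cases t with
    | nil =>
      simp at hz hy
      omega
    | cons b t' =>
      rw [List.getLast?_cons_cons] at hz
      rcases List.mem_cons.mp hy with hy | hy
      · subst hy
        exact le_trans (List.rel_of_pairwise_cons hp (List.mem_of_getLast? hz)) le_rfl
      · exact ih hp.of_cons hz y hy

lemma loopA_else {s : List Int} {l r acc : Int} (h : ¬ l < r) (hl : 0 ≤ l) :
    shuziLoop s l r acc = acc + pairG ((s.take (r + 1).toNat).drop l.toNat) := by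
  rw [shuziLoop, if_neg h, pairG_short, add_zero]
  simp only [List.length_drop, List.length_take]
  omega

lemma loopA_eq_pairG : ∀ (k : Nat) (s : List Int) (l r acc : Int), (r - l).toNat ≤ k →
    0 ≤ l → r < (s.length : Int) →
    shuziLoop s l r acc = acc + pairG ((s.take (r + 1).toNat).drop l.toNat) := by
  intro k
  induction k with
  | zero =>
    intro s l r acc hk hl _
    exact loopA_else (by omega) hl
  | succ k ih =>
    intro s l r acc hk hl hr
    by_cases hlr : l < r
    · rw [shuziLoop, if_pos hlr, ih s (l + 1) (r - 1) _ (by omega) (by omega) (by omega)]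
      have hr0 : (0 : Int) ≤ r := by omega
      set L := l.toNat with hLdef
      set R := r.toNat with hRdef
      have hLl : (L : Int) = l := Int.toNat_of_nonneg hl
      have hRr : (R : Int) = r := Int.toNat_of_nonneg hr0
      have hLR : L < R := by omega
      have hRlen : R < s.length := by omega
      have e1 : (r - 1 + 1).toNat = R := by omega
      have e2 : (l + 1).toNat = L + 1 := by omega
      have e3 : (r + 1).toNat = R + 1 := by omega
      rw [e1, e2, e3]
      set seg := (s.take (R + 1)).drop L with hseg
      have hseglen : seg.length = R + 1 - L := by
        simp only [hseg, List.length_drop, List.length_take]; omega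
      have hget : seg.getLastD 0 = PySem.List.pyGetD s r 0 := by
        rw [← hRr, PySem.List.pyGetD_natCast, List.getLastD_eq_getLast?,
          List.getLast?_eq_getElem?, hseglen]
        have h4 : R + 1 - L - 1 = R - L := by omega
        rw [h4, hseg, List.getElem?_drop, List.getElem?_take,
          if_pos (by omega : L + (R - L) < R + 1)]
        have h5 : L + (R - L) = R := by omega
        rw [h5, List.getElem?_eq_getElem hRlen, List.getD_eq_getElem?_getD,
          List.getElem?_eq_getElem hRlen]
      have hhead : seg.headD 0 = PySem.List.pyGetD s l 0 := by
        rw [← hLl, PySem.List.pyGetD_natCast, List.headD_eq_head?,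
          List.head?_eq_getElem?, hseg, List.getElem?_drop, List.getElem?_take,
          if_pos (by omega : L + 0 < R + 1)]
        have hLlen : L + 0 < s.length := by omega
        rw [List.getElem?_eq_getElem hLlen, List.getD_eq_getElem?_getD,
          List.getElem?_eq_getElem (by omega : L < s.length)]
        simp
      have hmid : seg.tail.dropLast = (s.take R).drop (L + 1) := by
        apply List.ext_getElem?
        intro i
        rw [List.dropLast_eq_take, List.length_tail, hseglen, hseg, List.tail_drop]
        rw [List.getElem?_take, List.getElem?_drop, List.getElem?_take,
          List.getElem?_drop, List.getElem?_take]
        split_ifs <;> first | rfl | (exfalso; omega)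
      conv_rhs => rw [pairG]
      rw [if_pos (by omega : 1 < seg.length), hget, hhead, hmid]
      ring
    · exact loopA_else hlr hl

lemma strip_else {b : List Int} (h : ¬ 1 < b.length) (t : Int) :
    stripLoop b t = t + pairG (PySem.List.sorted b (fun x => x) false) := by
  rw [stripLoop, if_neg h, pairG_short, add_zero]
  rw [PySem.List.length_sorted]
  exact h

lemma strip_eq_pairG : ∀ (k : Nat) (b : List Int), b.length ≤ k → ∀ (t : Int),
    stripLoop b t = t + pairG (PySem.List.sorted b (fun x => x) false) := by
  intro k
  induction k with
  | zero => intro b hb t; exact strip_else (by omega) t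
  | succ k ih =>
    intro b hb t
    by_cases hlen : 1 < b.length
    · have hsl : (PySem.List.sorted b (fun x => x) false).length = b.length :=
        PySem.List.length_sorted b _ false
      have hperm : (PySem.List.sorted b (fun x => x) false).Perm b :=
        PySem.List.sorted_perm b _ false
      have hpair : (PySem.List.sorted b (fun x => x) false).Pairwise (· ≤ ·) :=
        PySem.List.sorted_pairwise b _
      obtain ⟨m0, tl, hcons⟩ : ∃ m0 tl, PySem.List.sorted b (fun x => x) false = m0 :: tl := by
        cases hc : PySem.List.sorted b (fun x => x) false with
        | nil => rw [hc] at hsl; simp at hsl; omega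
        | cons x xs => exact ⟨x, xs, rfl⟩
      rw [hcons] at hsl hperm hpair
      have htlne : tl ≠ [] := by
        intro h; rw [h] at hsl; simp at hsl; omega
      obtain ⟨m, hm⟩ : ∃ m, PySem.List.min? b (fun x => x) = some m := by
        cases hmm : PySem.List.min? b (fun x => x) with
        | none =>
          rw [PySem.List.min?_eq_none_iff] at hmm
          rw [hmm] at hlen; simp at hlen
        | some x => exact ⟨x, rfl⟩
      obtain ⟨M, hM⟩ : ∃ M, PySem.List.max? b (fun x => x) = some M := by
        cases hmm : PySem.List.max? b (fun x => x) with
        | none =>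
          rw [PySem.List.max?_eq_none_iff] at hmm
          rw [hmm] at hlen; simp at hlen
        | some x => exact ⟨x, rfl⟩
      have hmmem : m ∈ b := PySem.List.min?_mem hm
      have hMmem : M ∈ b := PySem.List.max?_mem hM
      have hm0b : m0 ∈ b := hperm.subset List.mem_cons_self
      have hm0 : m = m0 :=
        le_antisymm (PySem.List.min?_isMin hm m0 hm0b)
          (PySem.List.key_head_sorted_le b (fun x => x) hcons m hmmem)
      subst hm0
      -- the last element of the sorted list is the maximum
      obtain ⟨z, hz⟩ : ∃ z, tl.getLast? = some z := by
        cases tl with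
        | nil => exact absurd rfl htlne
        | cons a l => exact ⟨_, List.getLast?_eq_some_getLast (by simp)⟩
      have hzmem : z ∈ tl := List.mem_of_getLast? hz
      have hzs : (m :: tl).getLast? = some z := by
        cases tl with
        | nil => exact absurd rfl htlne
        | cons a l => rw [List.getLast?_cons_cons]; exact hz
      have hMz : M = z := by
        refine le_antisymm ?_ (PySem.List.max?_isMax hM z (hperm.subset (List.mem_cons_of_mem _ hzmem)))
        exact pairwise_le_last hpair hzs M (hperm.mem_iff.mpr hMmem)
      subst hMz
      have hMtl : M ∈ tl := hzmem
      have h1 : PySem.List.remove? b m = some (b.erase m) :=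
        PySem.List.remove?_eq_some_erase b m hmmem
      have hb1perm : (b.erase m).Perm tl := by
        have h' : ((m :: tl).erase m).Perm (b.erase m) := hperm.erase m
        rw [List.erase_cons_head] at h'
        exact h'.symm
      have h2 : PySem.List.remove? (b.erase m) M = some ((b.erase m).erase M) :=
        PySem.List.remove?_eq_some_erase _ M (hb1perm.mem_iff.mpr hMtl)
      have hb2perm : ((b.erase m).erase M).Perm tl.dropLast := by
        refine (hb1perm.erase M).trans ?_
        have hgl : tl.getLast htlne = M := by
          rw [List.getLast?_eq_some_getLast htlne] at hz
          exact Option.some.inj hz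
        have hdec : tl.dropLast ++ [M] = tl := by
          rw [← hgl]; exact List.dropLast_append_getLast htlne
        have he : tl.erase M = (tl.dropLast ++ [M]).erase M := by
          conv_lhs => rw [← hdec]
        rw [he]
        by_cases hMd : M ∈ tl.dropLast
        · rw [List.erase_append_left _ hMd]
          exact (List.perm_append_singleton M _).trans (List.perm_cons_erase hMd).symm
        · rw [List.erase_append_right _ hMd, List.erase_cons_head]
          simp
      have hpairtl : tl.dropLast.Pairwise (· ≤ ·) :=
        List.Pairwise.sublist (List.dropLast_sublist tl) hpair.of_cons
      have hsorted2 : PySem.List.sorted ((b.erase m).erase M) (fun x => x) false = tl.dropLast :=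
        PySem.List.sorted_id_eq_of_perm_of_pairwise _ _ hb2perm.symm hpairtl
      have hlen1 : (b.erase m).length + 1 = b.length := remove?_length h1
      have hlen2 : ((b.erase m).erase M).length + 1 = (b.erase m).length := remove?_length h2
      rw [stripLoop, if_pos hlen, hm, hM]
      split
      · next heqv => simp at heqv
      · next mv heqv =>
        cases Option.some.inj heqv
        split
        · next heqw => simp at heqw
        · next Mv heqw =>
          cases Option.some.inj heqw
          split
          · next heq => rw [h1] at heq; simp at heq
          · next b1 heq =>
            rw [h1] at heq
            cases Option.some.inj heq
            split
            · next heq2 => rw [h2] at heq2; simp at heq2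
            · next b2 heq2 =>
              rw [h2] at heq2
              cases Option.some.inj heq2
              rw [ih _ (by omega) (t + (M - m)), hsorted2, hcons, pairG_cons hz]
              ring
    · exact strip_else hlen t

-- ===== VERDICT (by name: the statement is the Claim_ definition above) =====
theorem shuzi_spec : Claim_equal_shuzi := by
  intro a _
  unfold Spec_shuzi shuzi shuzi_alt
  set s := PySem.List.sorted a (fun x => x) false with hs
  rw [strip_eq_pairG a.length a le_rfl 0, ← hs]
  rcases Nat.eq_zero_or_pos s.length with h0 | h0
  · rw [shuziLoop]
    have hnl : ¬ (0 : Int) < (s.length : Int) - 1 := by omega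
    rw [if_neg hnl, pairG_short (by omega)]
    simp
  · rw [loopA_eq_pairG s.length s 0 ((s.length : Int) - 1) 0 (by omega) le_rfl (by omega)]
    have he : ((s.length : Int) - 1 + 1).toNat = s.length := by omega
    rw [he]
    norm_num [List.take_length]
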